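-- pv_equiv track=rewrite | github.com/JIEUNNN27/TIL | multicampus_국비교육/algorithm_programmers/level 1/lv1_1차 비밀지도.py | solution
-- ===== SOURCE A (Python) =====
-- def solution(n, arr1, arr2):
--     answer = ['' for i in range(n)]
--     for j in range(n):
--         a = arr1[j]
--         b = arr2[j]
--         for k in range(n):
--             if a%2 + b%2 > 0:
--                 answer[j] = '#' + answer[j]
--             else:
--                 answer[j] = ' ' + answer[j]
--             a = a//2
--             b = b//2
--
--     return answer
-- ===== SOURCE B (Python) =====
-- def solution(n, arr1, arr2):
--     # One integer OR + mask per row, rendered via a binary format string, instead of a per-bit loop.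
--     return [''.join('#' if c == '1' else ' ' for c in format((arr1[j] | arr2[j]) & ((1 << n) - 1), 'b').zfill(n))
--             for j in range(n)]
-- ===== Notes on version B (the rewrite author's own statement) =====
-- stated objective: idiomatic
-- what changed: Replaces the per-bit inner loop with mutable prepend-accumulation by one integer OR plus width-n mask per row, rendered through a binary format string (format(...,'b').zfill(n)) and a character map, built as a single list comprehension.
import Mathlib
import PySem

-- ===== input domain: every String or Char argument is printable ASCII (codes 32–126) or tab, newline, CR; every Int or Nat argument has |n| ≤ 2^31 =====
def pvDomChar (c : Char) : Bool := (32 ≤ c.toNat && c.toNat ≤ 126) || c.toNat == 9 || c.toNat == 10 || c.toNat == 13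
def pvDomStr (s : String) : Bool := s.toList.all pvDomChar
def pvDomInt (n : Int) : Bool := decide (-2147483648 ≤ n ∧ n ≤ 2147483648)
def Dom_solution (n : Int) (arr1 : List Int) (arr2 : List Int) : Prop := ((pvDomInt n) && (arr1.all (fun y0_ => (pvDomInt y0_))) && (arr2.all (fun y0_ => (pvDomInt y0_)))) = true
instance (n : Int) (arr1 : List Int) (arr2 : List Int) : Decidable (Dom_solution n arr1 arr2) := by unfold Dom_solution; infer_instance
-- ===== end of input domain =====

-- B renders each row from one masked integer OR via a binary format string instead of A's
-- per-bit inner loop with prepend accumulation; equal return values on all of Pre_.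

-- ===== PORT A =====
def solution (n : Int) (arr1 : List Int) (arr2 : List Int) : List String :=
  -- answer = ['' for i in range(n)]
  let answer : List String := (PySem.List.pyRange 0 n 1).map (fun _ => "")
  -- for j in range(n): a = arr1[j]; b = arr2[j]; for k in range(n): …
  (PySem.List.pyRange 0 n 1).foldl (fun ans j =>
    let a := (PySem.List.pyGet? arr1 j).getD 0   -- arr1[j]; none (IndexError) excluded by Pre_
    let b := (PySem.List.pyGet? arr2 j).getD 0   -- arr2[j]
    ((PySem.List.pyRange 0 n 1).foldl (fun (st : Int × Int × List String) _k =>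
        -- answer[j] = ('#' | ' ') + answer[j]; a = a//2; b = b//2
        (PySem.Int.floordiv st.1 2, PySem.Int.floordiv st.2.1 2,
         st.2.2.set j.toNat
           (if PySem.Int.mod st.1 2 + PySem.Int.mod st.2.1 2 > 0 then
              String.ofList ('#' :: ((PySem.List.pyGet? st.2.2 j).getD "").toList)
            else
              String.ofList (' ' :: ((PySem.List.pyGet? st.2.2 j).getD "").toList))))
      (a, b, ans)).2.2) answer

-- ===== PORT B =====
def solution_alt (n : Int) (arr1 : List Int) (arr2 : List Int) : List String :=
  -- [''.join('#' if c == '1' else ' ' for c in format((arr1[j] | arr2[j]) & ((1 << n) - 1), 'b').zfill(n)) for j in range(n)]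
  (PySem.List.pyRange 0 n 1).map (fun j =>
    -- (1 << n) - 1: inside the comprehension n ≥ 1, so the Nat shift 1 <<< n.toNat is exact
    let v : Int := PySem.Int.band
        (PySem.Int.bor ((PySem.List.pyGet? arr1 j).getD 0) ((PySem.List.pyGet? arr2 j).getD 0))
        ((1 <<< n.toNat) - 1)
    String.ofList ((PySem.Str.zfill (PySem.Int.toBin v) n).toList.map
      (fun c => if c = '1' then '#' else ' ')))

-- ===== PRECONDITION & SPEC =====
-- A evaluates arr1[j] / arr2[j] for every j < n and raises IndexError when either list is
-- shorter than n; exactly those inputs are excluded.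
def Pre_solution (n : Int) (arr1 : List Int) (arr2 : List Int) : Prop :=
  n ≤ (arr1.length : Int) ∧ n ≤ (arr2.length : Int)
instance (n : Int) (arr1 : List Int) (arr2 : List Int) : Decidable (Pre_solution n arr1 arr2) := by unfold Pre_solution; infer_instance

def pvWitness_solution : Int × List Int × List Int := (2, [1, 2], [2, 1])

def Spec_solution (n : Int) (arr1 : List Int) (arr2 : List Int) (out : List String) : Prop := out = solution_alt n arr1 arr2
instance (n : Int) (arr1 : List Int) (arr2 : List Int) (out : List String) : Decidable (Spec_solution n arr1 arr2 out) := by unfold Spec_solution; infer_instance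

-- ===== CLAIM (what is proved, stated in full; the proofs are below) =====
def Claim_equal_solution : Prop := ∀ (n : Int) (arr1 : List Int) (arr2 : List Int), Dom_solution n arr1 arr2 → Pre_solution n arr1 arr2 → Spec_solution n arr1 arr2 (solution n arr1 arr2)

-- ===== LEMMAS AND PROOFS =====

-- the character A prepends for the current low bits of a and b
def pvCell (a b : Int) : Char :=
  if PySem.Int.mod a 2 + PySem.Int.mod b 2 > 0 then '#' else ' '

-- A's row of width m as a pure recursion (later bits prepended in front)
def pvR (a b : Int) : Nat → List Char
  | 0 => []
  | m + 1 => pvR (PySem.Int.floordiv a 2) (PySem.Int.floordiv b 2) m ++ [pvCell a b]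

-- binary digits of a Nat, MSB first (empty for 0)
def pvAux : Nat → List Char
  | 0 => []
  | v + 1 => pvAux ((v + 1) / 2) ++ [if (v + 1) % 2 = 1 then '1' else '0']

-- the masked OR that B formats for width m
def pvM (a b : Int) (m : Nat) : Int := Int.land (Int.lor a b) (2 ^ m - 1)

-- binary rendering of v zero-padded to width m
def pvF (v m : Nat) : List Char :=
  let ds := Nat.toDigits 2 v
  List.replicate (m - ds.length) '0' ++ ds

-- ---- PySem's Python bitwise ops agree with Mathlib's Int.lor / Int.land ----

theorem pv_ldiff_eq_sub : ∀ n m : Nat, Nat.ldiff n m = n - (n &&& m) := by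
  intro n
  induction n using Nat.binaryRec with
  | zero => intro m; simp [Nat.ldiff]
  | bit b n ih =>
    intro m
    induction m using Nat.binaryRec with
    | zero =>
      cases b <;> simp [Nat.ldiff, Nat.bit]
    | bit c m _ =>
      rw [Nat.ldiff_bit, Nat.land_bit, ih]
      have h1 : n &&& m ≤ n := Nat.and_le_left
      cases b <;> cases c <;> simp [Nat.bit] <;> omega

theorem pv_bor_eq (a b : Int) : PySem.Int.bor a b = Int.lor a b := by
  cases a with
  | ofNat m =>
    cases b with
    | ofNat n => simp [PySem.Int.bor, Int.lor]
    | negSucc n =>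
      simp only [PySem.Int.bor, Int.lor, pv_ldiff_eq_sub, Int.negSucc_eq]
      norm_num
      split <;> omega
  | negSucc m =>
    cases b with
    | ofNat n =>
      simp only [PySem.Int.bor, Int.lor, pv_ldiff_eq_sub, Int.negSucc_eq]
      norm_num
      split <;> omega
    | negSucc n =>
      simp only [PySem.Int.bor, Int.lor, Int.negSucc_eq]
      norm_num
      split <;> [omega; (split <;> omega)]

theorem pv_band_eq (a b : Int) : PySem.Int.band a b = Int.land a b := by
  cases a with
  | ofNat m =>
    cases b with
    | ofNat n => simp [PySem.Int.band, Int.land]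
    | negSucc n =>
      simp only [PySem.Int.band, Int.land, pv_ldiff_eq_sub, Int.negSucc_eq]
      norm_num
      intro hc
      omega
  | negSucc m =>
    cases b with
    | ofNat n =>
      simp only [PySem.Int.band, Int.land, pv_ldiff_eq_sub, Int.negSucc_eq]
      norm_num
      intro hc
      omega
    | negSucc n =>
      simp only [PySem.Int.band, Int.land, Int.negSucc_eq]
      norm_num
      split <;> [omega; (split <;> omega)]

-- ---- mod / floordiv by 2 against bodd / div2 ----

theorem pv_mod_two (a : Int) : PySem.Int.mod a 2 = if a.bodd then 1 else 0 := by
  have hd := Int.bodd_add_div2 a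
  rw [Int.div2_val] at hd
  rw [PySem.Int.mod_eq_emod_of_pos (by norm_num)]
  cases hb : a.bodd <;> simp [hb] at hd ⊢ <;> omega

theorem pv_floordiv_two (a : Int) : PySem.Int.floordiv a 2 = a.div2 := by
  rw [PySem.Int.floordiv_eq_ediv_of_pos (by norm_num : (0:Int) < 2), Int.div2_val]

theorem pv_cell_eq (a b : Int) : pvCell a b = if (a.bodd || b.bodd) then '#' else ' ' := by
  unfold pvCell
  rw [pv_mod_two, pv_mod_two]
  cases a.bodd <;> cases b.bodd <;> norm_num

-- ---- recursion and bounds for the masked OR ----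

theorem pv_land_zero (x : Int) : Int.land x 0 = 0 := by
  cases x with
  | ofNat m => simp [Int.land]
  | negSucc m => simp [Int.land, Nat.ldiff]

theorem pvM_zero (a b : Int) : pvM a b 0 = 0 := by
  simp [pvM, pv_land_zero]

theorem pv_mask_succ (m : Nat) : (2:Int) ^ (m+1) - 1 = Int.bit true (2 ^ m - 1) := by
  simp [Int.bit, pow_succ]
  ring

theorem pvM_succ (a b : Int) (m : Nat) :
    pvM a b (m + 1) = Int.bit (a.bodd || b.bodd) (pvM a.div2 b.div2 m) := by
  unfold pvM
  conv_lhs => rw [← Int.bit_decomp a, ← Int.bit_decomp b]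
  rw [Int.lor_bit, pv_mask_succ, Int.land_bit]
  simp

theorem pvM_nonneg_lt (a b : Int) (m : Nat) : 0 ≤ pvM a b m ∧ pvM a b m < 2 ^ m := by
  induction m generalizing a b with
  | zero => simp [pvM_zero]
  | succ m ih =>
    rw [pvM_succ]
    obtain ⟨h1, h2⟩ := ih a.div2 b.div2
    cases a.bodd || b.bodd <;> simp [Int.bit] <;> rw [pow_succ] <;> omega

theorem pvM_toNat_succ (a b : Int) (m : Nat) :
    (pvM a b (m + 1)).toNat = 2 * (pvM a.div2 b.div2 m).toNat + (if a.bodd || b.bodd then 1 else 0) := by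
  rw [pvM_succ]
  have h1 := (pvM_nonneg_lt a.div2 b.div2 m).1
  cases a.bodd || b.bodd <;> simp [Int.bit] <;> omega

theorem pvM_toNat_lt (a b : Int) (m : Nat) : (pvM a b m).toNat < 2 ^ m := by
  have := pvM_nonneg_lt a b m
  have h2 : ((2:Int) ^ m) = ((2 ^ m : Nat) : Int) := by push_cast; ring
  omega

-- ---- Nat.toDigits 2 is pvAux ----

theorem pv_toDigitsCore_eq (f : Nat) : ∀ v acc, 0 < v → v ≤ f →
    Nat.toDigitsCore 2 f v acc = pvAux v ++ acc := by
  induction f with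
  | zero => intro v acc h1 h2; omega
  | succ f ih =>
    intro v acc h1 h2
    rw [Nat.toDigitsCore]
    by_cases hv : v / 2 = 0
    · have : v = 1 := by omega
      subst this
      simp [pvAux, Nat.digitChar]
    · simp only [hv, if_false]
      rw [ih (v / 2) _ (by omega) (by omega)]
      obtain ⟨w, rfl⟩ : ∃ w, v = w + 1 := ⟨v - 1, by omega⟩
      rw [pvAux]
      have hd : Nat.digitChar ((w+1) % 2) = if (w+1) % 2 = 1 then '1' else '0' := by
        rcases Nat.mod_two_eq_zero_or_one (w+1) with h | h <;> rw [h] <;> simp [Nat.digitChar]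
      rw [hd]
      simp

theorem pv_toDigits_eq (v : Nat) : Nat.toDigits 2 v = if v = 0 then ['0'] else pvAux v := by
  by_cases h : v = 0
  · subst h; simp [Nat.toDigits, Nat.toDigitsCore, Nat.digitChar]
  · rw [Nat.toDigits, pv_toDigitsCore_eq (v+1) v [] (by omega) (by omega), if_neg h]
    simp

theorem pvAux_chars : ∀ v, ∀ c ∈ pvAux v, c = '0' ∨ c = '1' := by
  intro v
  induction v using Nat.strong_induction_on with
  | _ v ih =>
    match v with
    | 0 => intro c hc; simp [pvAux] at hc
    | w + 1 =>
      intro c hc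
      rw [pvAux] at hc
      rcases List.mem_append.1 hc with h | h
      · exact ih ((w+1)/2) (by omega) c h
      · simp at h
        split at h <;> simp [h]

theorem pvAux_length_le : ∀ k v, v < 2 ^ k → (pvAux v).length ≤ k := by
  intro k
  induction k with
  | zero => intro v hv; interval_cases v; simp [pvAux]
  | succ k ih =>
    intro v hv
    match v with
    | 0 => simp [pvAux]
    | w + 1 =>
      rw [pvAux]
      simp only [List.length_append, List.length_singleton]
      have := ih ((w+1)/2) (by omega)
      omega

-- ---- zfill of the binary string is pvF ----

theorem pv_zfill_eq (v : Nat) (w : Int) :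
    (PySem.Str.zfill (PySem.Int.toBin (v : Int)) w).toList = pvF v w.toNat := by
  rw [PySem.Str.toList_zfill]
  have htb : (PySem.Int.toBin (v : Int)).toList = Nat.toDigits 2 v := by
    rw [PySem.Int.toList_toBin]
    simp [PySem.Int.toBinChars]
  rw [htb]
  have hne : Nat.toDigits 2 v ≠ [] := by
    rw [pv_toDigits_eq]
    split
    · simp
    · match v, ‹v ≠ 0› with
      | w + 1, _ => rw [pvAux]; simp
  have hhead : ∀ c cs, Nat.toDigits 2 v = c :: cs → ¬ (c = '+' ∨ c = '-') := by
    intro c cs hc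
    have : c = '0' ∨ c = '1' := by
      rw [pv_toDigits_eq] at hc
      split at hc
      · simp at hc; left; exact hc.1.symm
      · exact pvAux_chars v c (hc ▸ List.mem_cons_self)
    rcases this with h | h <;> subst h <;> decide
  unfold PySem.Chars.zfill
  unfold pvF
  by_cases hw : w ≤ ((Nat.toDigits 2 v).length : Int)
  · rw [if_pos hw]
    have : w.toNat - (Nat.toDigits 2 v).length = 0 := by omega
    simp [this]
  · rw [if_neg hw]
    match hds : Nat.toDigits 2 v with
    | [] => exact absurd hds hne
    | c :: rest =>
      have := hhead c rest hds
      simp only []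
      rw [if_neg this]

theorem pvF_succ (v m : Nat) (hm : 1 ≤ m) (hv : v < 2 ^ (m + 1)) :
    pvF v (m + 1) = pvF (v / 2) m ++ [if v % 2 = 1 then '1' else '0'] := by
  match v with
  | 0 =>
    simp only [pvF, pv_toDigits_eq]
    norm_num
    obtain ⟨m', rfl⟩ : ∃ m', m = m' + 1 := ⟨m - 1, by omega⟩
    simp [List.replicate_succ']
  | 1 =>
    simp only [pvF, pv_toDigits_eq]
    norm_num [pvAux]
    obtain ⟨m', rfl⟩ : ∃ m', m = m' + 1 := ⟨m - 1, by omega⟩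
    simp [List.replicate_succ']
  | w + 2 =>
    have h2 : (w + 2) / 2 ≠ 0 := by omega
    simp only [pvF, pv_toDigits_eq, if_neg (by omega : ¬ w + 2 = 0), if_neg h2]
    rw [pvAux]
    have hlen : (pvAux ((w+2)/2)).length ≤ m := pvAux_length_le m _ (by omega)
    simp only [List.length_append, List.length_singleton]
    rw [show m + 1 - ((pvAux ((w+2)/2)).length + 1) = m - (pvAux ((w+2)/2)).length by omega]
    simp only [List.append_assoc]

-- ---- the per-row equality: B's rendered row is A's row ----

theorem pv_row (m : Nat) (hm : 1 ≤ m) (a b : Int) :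
    (pvF (pvM a b m).toNat m).map (fun c => if c = '1' then '#' else ' ') = pvR a b m := by
  induction m generalizing a b with
  | zero => omega
  | succ m ih =>
    match m, ih with
    | 0, _ =>
      have h1 : (pvM a b 1).toNat = if a.bodd || b.bodd then 1 else 0 := by
        rw [pvM_toNat_succ]; simp [pvM_zero]
      rw [pvR, pvR, h1, pv_cell_eq]
      cases hc : a.bodd || b.bodd <;> simp [pvF, pv_toDigits_eq, pvAux]
    | m + 1, ih =>
      rw [pvF_succ _ _ (by omega) (pvM_toNat_lt a b (m+1+1))]
      rw [List.map_append]
      rw [pvM_toNat_succ]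
      have hdiv : (2 * (pvM a.div2 b.div2 (m+1)).toNat + (if a.bodd || b.bodd then 1 else 0)) / 2
          = (pvM a.div2 b.div2 (m+1)).toNat := by
        cases a.bodd || b.bodd <;> simp <;> omega
      have hmod : (2 * (pvM a.div2 b.div2 (m+1)).toNat + (if a.bodd || b.bodd then 1 else 0)) % 2
          = (if a.bodd || b.bodd then 1 else 0) := by
        cases a.bodd || b.bodd <;> simp <;> omega
      rw [hdiv, hmod, ih (by omega) a.div2 b.div2]
      conv_rhs => rw [pvR]
      rw [pv_floordiv_two, pv_floordiv_two, pv_cell_eq]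
      cases a.bodd || b.bodd <;> simp

-- ---- A's inner loop sets slot jn to the recursive row ----

theorem pv_inner (l : List Int) : ∀ (a b : Int) (ans : List String) (jn : Nat), jn < ans.length →
    ((l.foldl (fun (st : Int × Int × List String) _k =>
        (PySem.Int.floordiv st.1 2, PySem.Int.floordiv st.2.1 2,
         st.2.2.set jn
           (if PySem.Int.mod st.1 2 + PySem.Int.mod st.2.1 2 > 0 then
              String.ofList ('#' :: ((PySem.List.pyGet? st.2.2 (jn : Int)).getD "").toList)
            else
              String.ofList (' ' :: ((PySem.List.pyGet? st.2.2 (jn : Int)).getD "").toList))))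
      (a, b, ans)).2.2)
    = ans.set jn (String.ofList (pvR a b l.length ++ (ans.getD jn "").toList)) := by
  induction l with
  | nil =>
    intro a b ans jn hj
    simp only [List.foldl_nil, List.length_nil, pvR, List.nil_append]
    rw [String.ofList_toList]
    rw [List.getD_eq_getElem?_getD, List.getElem?_eq_getElem hj]
    simp
  | cons x l ih =>
    intro a b ans jn hj
    rw [List.foldl_cons]
    have hget : (PySem.List.pyGet? ans (jn : Int)).getD "" = ans[jn] := by
      simp [PySem.List.pyGet?_natCast, List.getElem?_eq_getElem hj]
    have hsetarg : (if PySem.Int.mod a 2 + PySem.Int.mod b 2 > 0 then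
              String.ofList ('#' :: ((PySem.List.pyGet? ans (jn : Int)).getD "").toList)
            else
              String.ofList (' ' :: ((PySem.List.pyGet? ans (jn : Int)).getD "").toList))
          = String.ofList (pvCell a b :: ans[jn].toList) := by
      rw [hget]
      unfold pvCell
      split_ifs <;> rfl
    show ((l.foldl _ (PySem.Int.floordiv a 2, PySem.Int.floordiv b 2, ans.set jn _)).2.2) = _
    rw [hsetarg]
    rw [ih _ _ _ jn (by simpa using hj)]
    rw [List.set_set]
    have hgd : (ans.set jn (String.ofList (pvCell a b :: ans[jn].toList))).getD jn ""
        = String.ofList (pvCell a b :: ans[jn].toList) := by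
      rw [List.getD_eq_getElem?_getD, List.getElem?_set_self (by simpa using hj)]
      rfl
    rw [hgd]
    show _ = ans.set jn (String.ofList (pvR a b (l.length + 1) ++ (ans.getD jn "").toList))
    rw [pvR]
    congr 1
    rw [String.toList_ofList]
    rw [List.getD_eq_getElem?_getD, List.getElem?_eq_getElem hj]
    simp

-- ---- A's outer loop: each index sets its own slot ----

theorem pv_outer (G : List String → Int → List String) (F : Nat → String → String) (N : Nat)
    (hG : ∀ ans (j : Nat), j < N → ans.length = N → G ans (j : Int) = ans.set j (F j (ans.getD j ""))) :
    ∀ (js : List Nat) (ans : List String), ans.length = N → js.Nodup → (∀ i ∈ js, i < N) →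
      ((List.map (fun (k : Nat) => (k : Int)) js).foldl G ans).length = N ∧
      ∀ i, i < N → ((List.map (fun (k : Nat) => (k : Int)) js).foldl G ans).getD i ""
        = if i ∈ js then F i (ans.getD i "") else ans.getD i "" := by
  intro js
  induction js with
  | nil =>
    intro ans hlen _ _
    simp [hlen]
  | cons j js ih =>
    intro ans hlen hnd hmem
    have hj : j < N := hmem j List.mem_cons_self
    rw [List.map_cons, List.foldl_cons, hG ans j hj hlen]
    have hlen' : (ans.set j (F j (ans.getD j ""))).length = N := by simp [hlen]
    obtain ⟨ih1, ih2⟩ := ih (ans.set j (F j (ans.getD j ""))) hlen' (List.nodup_cons.1 hnd).2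
      (fun i hi => hmem i (List.mem_cons_of_mem _ hi))
    refine ⟨ih1, ?_⟩
    intro i hi
    rw [ih2 i hi]
    by_cases hij : i ∈ js
    · rw [if_pos hij, if_pos (List.mem_cons_of_mem _ hij)]
      have hne : i ≠ j := fun h => ((List.nodup_cons.1 hnd).1 (h ▸ hij)).elim
      rw [List.getD_eq_getElem?_getD, List.getElem?_set_ne (by omega), ← List.getD_eq_getElem?_getD]
    · rw [if_neg hij]
      by_cases hijj : i = j
      · subst hijj
        rw [if_pos List.mem_cons_self]
        rw [List.getD_eq_getElem?_getD, List.getElem?_set_self (by omega), ← hlen] at *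
        simp
      · rw [if_neg (by simp [hijj, hij])]
        rw [List.getD_eq_getElem?_getD, List.getElem?_set_ne (by omega), ← List.getD_eq_getElem?_getD]

theorem pv_pyRange_cast (n : Int) :
    PySem.List.pyRange 0 n 1 = List.map (fun (k : Nat) => (k : Int)) (List.range n.toNat) := by
  rw [PySem.List.pyRange_one]
  simp

-- the port-B row rendered for index j equals A's recursive row of width n.toNat
theorem pv_row_eq (n : Int) (arr1 arr2 : List Int) (j : Nat) (hj : j < n.toNat) :
    String.ofList ((PySem.Str.zfill (PySem.Int.toBin
        (PySem.Int.band
          (PySem.Int.bor ((PySem.List.pyGet? arr1 (j : Int)).getD 0) ((PySem.List.pyGet? arr2 (j : Int)).getD 0))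
          ((1 <<< n.toNat) - 1))) n).toList.map (fun c => if c = '1' then '#' else ' '))
    = String.ofList (pvR ((PySem.List.pyGet? arr1 (j : Int)).getD 0) ((PySem.List.pyGet? arr2 (j : Int)).getD 0) n.toNat) := by
  set a := (PySem.List.pyGet? arr1 (j : Int)).getD 0
  set b := (PySem.List.pyGet? arr2 (j : Int)).getD 0
  have hv : PySem.Int.band (PySem.Int.bor a b) ((1 <<< n.toNat) - 1) = pvM a b n.toNat := by
    rw [pv_band_eq, pv_bor_eq, Nat.one_shiftLeft, pvM]
    push_cast
    ring_nf
  rw [hv]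
  have hnn : (0:Int) ≤ pvM a b n.toNat := (pvM_nonneg_lt a b n.toNat).1
  have hcast : pvM a b n.toNat = (((pvM a b n.toNat).toNat : Nat) : Int) := by omega
  rw [hcast, pv_zfill_eq]
  congr 1
  exact pv_row n.toNat (by omega) a b

-- ===== VERDICT (by name: the statement is the Claim_ definition above) =====
theorem solution_spec : Claim_equal_solution := by
  unfold Claim_equal_solution Spec_solution
  intro n arr1 arr2 _hdom hpre
  unfold solution solution_alt
  rw [pv_pyRange_cast n]
  change (List.map (fun (k : Nat) => (k : Int)) (List.range n.toNat)).foldl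
      (fun (ans : List String) (j : Int) =>
        ((List.map (fun (k : Nat) => (k : Int)) (List.range n.toNat)).foldl
          (fun (st : Int × Int × List String) _k =>
            (PySem.Int.floordiv st.1 2, PySem.Int.floordiv st.2.1 2,
             st.2.2.set j.toNat
               (if PySem.Int.mod st.1 2 + PySem.Int.mod st.2.1 2 > 0 then
                  String.ofList ('#' :: ((PySem.List.pyGet? st.2.2 j).getD "").toList)
                else
                  String.ofList (' ' :: ((PySem.List.pyGet? st.2.2 j).getD "").toList))))
          ((PySem.List.pyGet? arr1 j).getD 0, (PySem.List.pyGet? arr2 j).getD 0, ans)).2.2)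
      ((List.map (fun (k : Nat) => (k : Int)) (List.range n.toNat)).map (fun _ => ""))
    = (List.map (fun (k : Nat) => (k : Int)) (List.range n.toNat)).map (fun j =>
        String.ofList ((PySem.Str.zfill (PySem.Int.toBin
          (PySem.Int.band
            (PySem.Int.bor ((PySem.List.pyGet? arr1 j).getD 0) ((PySem.List.pyGet? arr2 j).getD 0))
            ((1 <<< n.toNat) - 1))) n).toList.map (fun c => if c = '1' then '#' else ' ')))
  set N := n.toNat with hN
  set F : Nat → String → String := fun j s => String.ofList
    (pvR ((PySem.List.pyGet? arr1 (j : Int)).getD 0) ((PySem.List.pyGet? arr2 (j : Int)).getD 0) N ++ s.toList)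
    with hF
  set ans0 : List String := (List.map (fun (k : Nat) => (k : Int)) (List.range N)).map (fun _ => "") with hans0
  have hans0len : ans0.length = N := by simp [hans0]
  have hans0getD : ∀ i, ans0.getD i "" = "" := by
    intro i
    rw [List.getD_eq_getElem?_getD, hans0]
    by_cases h : i < N <;> simp [h]
  have hG : ∀ (ans : List String) (j : Nat), j < N → ans.length = N →
      (fun (ans : List String) (j : Int) =>
        ((List.map (fun (k : Nat) => (k : Int)) (List.range N)).foldl
          (fun (st : Int × Int × List String) _k =>
            (PySem.Int.floordiv st.1 2, PySem.Int.floordiv st.2.1 2,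
             st.2.2.set j.toNat
               (if PySem.Int.mod st.1 2 + PySem.Int.mod st.2.1 2 > 0 then
                  String.ofList ('#' :: ((PySem.List.pyGet? st.2.2 j).getD "").toList)
                else
                  String.ofList (' ' :: ((PySem.List.pyGet? st.2.2 j).getD "").toList))))
          ((PySem.List.pyGet? arr1 j).getD 0, (PySem.List.pyGet? arr2 j).getD 0, ans)).2.2) ans (j : Int)
      = ans.set j (F j (ans.getD j "")) := by
    intro ans j hj hlen
    simp only [Int.toNat_natCast]
    rw [pv_inner _ _ _ ans j (by omega)]
    simp only [List.length_map, List.length_range, hF]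
  have houter := pv_outer (fun (ans : List String) (j : Int) =>
        ((List.map (fun (k : Nat) => (k : Int)) (List.range N)).foldl
          (fun (st : Int × Int × List String) _k =>
            (PySem.Int.floordiv st.1 2, PySem.Int.floordiv st.2.1 2,
             st.2.2.set j.toNat
               (if PySem.Int.mod st.1 2 + PySem.Int.mod st.2.1 2 > 0 then
                  String.ofList ('#' :: ((PySem.List.pyGet? st.2.2 j).getD "").toList)
                else
                  String.ofList (' ' :: ((PySem.List.pyGet? st.2.2 j).getD "").toList))))
          ((PySem.List.pyGet? arr1 j).getD 0, (PySem.List.pyGet? arr2 j).getD 0, ans)).2.2)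
      F N hG (List.range N) ans0 hans0len List.nodup_range
    (fun i hi => List.mem_range.1 hi)
  obtain ⟨hlenL, hgetL⟩ := houter
  apply List.ext_getElem
  · rw [hlenL]; simp
  · intro i hi hi2
    have hiN : i < N := by rwa [hlenL] at hi
    have hL : _ = _ := hgetL i hiN
    rw [List.getD_eq_getElem?_getD, List.getElem?_eq_getElem hi] at hL
    simp only [Option.getD_some] at hL
    rw [hL, if_pos (List.mem_range.2 hiN), hans0getD i]
    -- right-hand side element
    rw [List.getElem_map, List.getElem_map, List.getElem_range]
    have := pv_row_eq n arr1 arr2 i hiN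
    rw [this, hF]
    simp only [List.append_nil, String.toList_empty]
    rfl
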